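-- pv_equiv track=rewrite | github.com/informaticienzero/CodinGame | Moyens/Stock Exchange Losses.py | biggest_decrease
-- ===== SOURCE A (Python) =====
-- from typing import List
--
-- def biggest_decrease(values: List[int]) -> int:
--     """
--     Gets the biggest decrease in a list of integers. If there is no, returns 0.
--     # https://stackoverflow.com/a/32161433/6060256
--
--     Args:
--         values (list[int]) - List of integers.
--     """
--     max_value: int = values[0]
--     max_drop: int = -1
--
--     for value in values:
--         if max_value < value:
--             max_value = value
--         else:
--             drop: int = max_value - value
--             max_drop = max(max_drop, drop)
--
--     return max_drop if max_drop != -1 else 0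
-- ===== SOURCE B (Python) =====
-- def biggest_decrease(values):
--     peaks = [values[0]]
--     for v in values[1:]:
--         peaks.append(max(peaks[-1], v))
--     return max(p - v for p, v in zip(peaks, values))
-- ===== Notes on version B (the rewrite author's own statement) =====
-- stated objective: alternative
-- what changed: Replaces A's fused running-max-with-drop scan (and its -1 sentinel plus final fix-up) by a two-pass table-then-reduce: build the prefix-maximum table, then take the maximum of peaks[i]-values[i].
import Mathlib
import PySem

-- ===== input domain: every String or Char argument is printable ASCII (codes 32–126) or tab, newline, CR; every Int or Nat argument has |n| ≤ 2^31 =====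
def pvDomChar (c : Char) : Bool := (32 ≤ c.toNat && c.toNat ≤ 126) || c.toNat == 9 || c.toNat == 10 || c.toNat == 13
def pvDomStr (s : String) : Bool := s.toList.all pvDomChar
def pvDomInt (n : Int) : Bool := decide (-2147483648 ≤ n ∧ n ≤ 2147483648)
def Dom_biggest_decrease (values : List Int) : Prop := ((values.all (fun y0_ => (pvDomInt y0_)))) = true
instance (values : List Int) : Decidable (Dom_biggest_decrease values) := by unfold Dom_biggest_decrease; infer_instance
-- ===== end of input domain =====

-- B replaces A's fused running-max/drop scan by a two-pass prefix-maximum table then a reduce (alternative decomposition, same cost).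


-- ===== PORT A =====
-- A: single fused scan keeping (max_value, max_drop), max_drop seeded with -1, final fix-up -1 → 0.
def biggest_decrease (values : List Int) : Int :=
  let max_value : Int := (PySem.List.pyGet? values 0).getD 0
  let s := values.foldl
    (fun (st : Int × Int) v =>
      if st.1 < v then (v, st.2) else (st.1, max st.2 (st.1 - v)))
    (max_value, -1)
  if s.2 ≠ -1 then s.2 else 0

-- ===== PORT B =====
-- B: first pass builds the prefix-maximum table `peaks` (peaks[-1] carried as st.2),
-- second pass reduces max over peaks[i] - values[i].
def biggest_decrease_alt (values : List Int) : Int :=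
  let p0 : Int := (PySem.List.pyGet? values 0).getD 0
  let peaks := ((PySem.List.slice values (some 1) none).foldl
    (fun (st : List Int × Int) v => (st.1 ++ [max st.2 v], max st.2 v))
    ([p0], p0)).1
  (PySem.List.max? (List.zipWith (fun p v => p - v) peaks values) (fun x => x)).getD 0

-- ===== PRECONDITION & SPEC =====
-- Pre_ excludes only the empty list, on which Python A raises IndexError (values[0]).
def Pre_biggest_decrease (values : List Int) : Prop := values ≠ []
instance (values : List Int) : Decidable (Pre_biggest_decrease values) := by unfold Pre_biggest_decrease; infer_instance
def pvWitness_biggest_decrease : List Int := [5, 3, 4, 1]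

def Spec_biggest_decrease (values : List Int) (out : Int) : Prop := out = biggest_decrease_alt values
instance (values : List Int) (out : Int) : Decidable (Spec_biggest_decrease values out) := by unfold Spec_biggest_decrease; infer_instance

-- ===== CLAIM (what is proved, stated in full; the proofs are below) =====
def Claim_equal_biggest_decrease : Prop := ∀ (values : List Int), Dom_biggest_decrease values → Pre_biggest_decrease values → Spec_biggest_decrease values (biggest_decrease values)

-- ===== LEMMAS AND PROOFS =====

-- the list of drops prefmax[i] - values[i] over l, running max seeded with m
def pvDrops (m : Int) : List Int → List Int
  | [] => []
  | v :: t => (max m v - v) :: pvDrops (max m v) t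

-- A's step equals the symmetric step (max m v, max d (max m v - v)) once d ≥ 0
lemma pvA_fold (l : List Int) : ∀ (m d : Int), 0 ≤ d →
    (l.foldl (fun (st : Int × Int) v =>
        if st.1 < v then (v, st.2) else (st.1, max st.2 (st.1 - v))) (m, d)).2
      = (pvDrops m l).foldl max d := by
  induction l with
  | nil => intro m d _; simp [pvDrops]
  | cons v t ih =>
    intro m d hd
    simp only [List.foldl, pvDrops]
    by_cases h : m < v
    · have hmax : max m v = v := by omega
      have : (if m < v then (v, d) else (m, max d (m - v))) = (v, max d (max m v - v)) := by
        simp [h, hmax]; omega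
      rw [this, hmax]
      simpa using ih v (max d (v - v)) (by omega)
    · have hmax : max m v = m := by omega
      have : (if m < v then (v, d) else (m, max d (m - v))) = (m, max d (max m v - v)) := by
        simp [h, hmax]
      rw [this, hmax]
      exact ih m (max d (m - v)) (by omega)

-- B's peaks-building fold appends exactly the prefix maxima
lemma pvB_peaks (l : List Int) : ∀ (acc : List Int) (m : Int),
    (l.foldl (fun (st : List Int × Int) v => (st.1 ++ [max st.2 v], max st.2 v)) (acc, m)).1
      = acc ++ (pvDrops m l).zipWith (fun d v => d + v) l := by
  -- peaks element i (past acc) is prefmax_i = drop_i + v_i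
  induction l with
  | nil => intro acc m; simp [pvDrops]
  | cons v t ih =>
    intro acc m
    simp only [List.foldl, pvDrops, List.zipWith]
    rw [ih]
    have : max m v - v + v = max m v := by omega
    simp [this]

-- zipWith subtraction of (drops + values) with values gives back the drops
lemma pvZip_sub (l : List Int) : ∀ (m : Int),
    List.zipWith (fun p v => p - v) ((pvDrops m l).zipWith (fun d v => d + v) l) l
      = pvDrops m l := by
  induction l with
  | nil => intro m; simp [pvDrops]
  | cons v t ih => intro m; simp [pvDrops, ih]

theorem pvMain (values : List Int) (h : values ≠ []) :
    biggest_decrease values = biggest_decrease_alt values := by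
  obtain ⟨v0, rest, rfl⟩ := List.exists_cons_of_ne_nil h
  unfold biggest_decrease biggest_decrease_alt
  have hget : (PySem.List.pyGet? (v0 :: rest) 0).getD 0 = v0 := by
    simp [PySem.List.pyGet?, PySem.List.pyIdx?]
  have hslice : PySem.List.slice (v0 :: rest) (some 1) none = rest := by
    simpa using PySem.List.slice_from_one (v0 :: rest)
  simp only [hget, hslice]
  -- A side
  have hAstep : (if v0 < v0 then (v0, (-1 : Int)) else (v0, max (-1) (v0 - v0))) = (v0, (0 : Int)) := by
    simp
  have hA : (List.foldl (fun (st : Int × Int) v =>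
        if st.1 < v then (v, st.2) else (st.1, max st.2 (st.1 - v))) (v0, -1) (v0 :: rest)).2
      = (pvDrops v0 rest).foldl max 0 := by
    simp only [List.foldl, hAstep]
    exact pvA_fold rest v0 0 le_rfl
  -- the fold of max starting at 0 is nonnegative
  have hnn : ∀ (L : List Int) (d : Int), d ≤ L.foldl max d := by
    intro L
    induction L with
    | nil => intro d; simp
    | cons x t ih => intro d; exact le_trans (le_max_left d x) (ih (max d x))
  -- B side
  have hB : ((rest.foldl (fun (st : List Int × Int) v => (st.1 ++ [max st.2 v], max st.2 v))
        ([v0], v0)).1) = v0 :: (pvDrops v0 rest).zipWith (fun d v => d + v) rest := by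
    simpa using pvB_peaks rest [v0] v0
  rw [hA, hB]
  have hzip : List.zipWith (fun p v => p - v)
      (v0 :: (pvDrops v0 rest).zipWith (fun d v => d + v) rest) (v0 :: rest)
      = 0 :: pvDrops v0 rest := by
    simp [List.zipWith, pvZip_sub]
  rw [hzip, PySem.List.max?_id_cons]
  have hpos := hnn (pvDrops v0 rest) 0
  have : ((pvDrops v0 rest).foldl max 0 ≠ -1) := by omega
  simp [this]

-- ===== VERDICT (by name: the statement is the Claim_ definition above) =====
theorem biggest_decrease_spec : Claim_equal_biggest_decrease := by
  intro values _ hpre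
  exact pvMain values hpre
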